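-- pv_equiv track=rewrite | github.com/tec9nec/labs | laba3/lab3.py | process
-- ===== SOURCE A (Python) =====
-- words = {
--     '0': 'ноль', '1': 'один', '2': 'два', '3': 'три', '4': 'четыре',
--     '5': 'пять', '6': 'шесть', '7': 'семь', '8': 'восемь', '9': 'девять'
-- }
--
-- def number_words(number):
--     """Преобразует число в слова."""
--     result = ""
--     for digit in str(number):
--         result += words[digit] + " "  # добавляем слово и пробел
--     return result.strip()  # убрать пробел
--
-- def process(input_posled):
--     """Обрабатывает последовательность символов, распознавая числа."""
--     result = ""
--     position = 1  # позиция числа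
--     numbers = input_posled.split()  # деление строки на слова
--
--     for item in numbers:
--         if item.isdigit() and len(item) <= 5:
--             number = int(item)
--             if number % 2 == 0:
--                 if position % 2 != 0:
--                     result += number_words(number) + " "
--                 else:  # Чётная позиция
--                     result += item + " "
--                 position += 1  # Учитываем только подходящие числа
--
--     return result.strip()  # Убираем лишний пробел в конце
-- ===== SOURCE B (Python) =====
-- WORDS = ['ноль', 'один', 'два', 'три', 'четыре',
--          'пять', 'шесть', 'семь', 'восемь', 'девять']
--
-- def number_words(number):
--     """Преобразует число в слова (таблица-список, индекс = код цифры)."""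
--     return " ".join(WORDS[ord(d) - 48] for d in str(number))
--
-- def process(input_posled):
--     """Обрабатывает последовательность символов, распознавая числа."""
--     qualifying = [t for t in input_posled.split()
--                   if t.isdigit() and len(t) <= 5 and int(t) % 2 == 0]
--     parts = []
--     it = iter(qualifying)
--     for first in it:
--         parts.append(number_words(int(first)))
--         second = next(it, None)
--         if second is None:
--             break
--         parts.append(second)
--     return " ".join(parts)
-- ===== Notes on version B (the rewrite author's own statement) =====
-- stated objective: alternative
-- what changed: B drops A's position counter and parity test entirely: it filters the qualifying even tokens once, then consumes them two at a time from a single iterator (spelling the first of each pair, keeping the second literally) and space-joins the parts; the word table becomes a list indexed by the digit's character code instead of a dict, and number_words is a join instead of accumulate-and-strip.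
import Mathlib
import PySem

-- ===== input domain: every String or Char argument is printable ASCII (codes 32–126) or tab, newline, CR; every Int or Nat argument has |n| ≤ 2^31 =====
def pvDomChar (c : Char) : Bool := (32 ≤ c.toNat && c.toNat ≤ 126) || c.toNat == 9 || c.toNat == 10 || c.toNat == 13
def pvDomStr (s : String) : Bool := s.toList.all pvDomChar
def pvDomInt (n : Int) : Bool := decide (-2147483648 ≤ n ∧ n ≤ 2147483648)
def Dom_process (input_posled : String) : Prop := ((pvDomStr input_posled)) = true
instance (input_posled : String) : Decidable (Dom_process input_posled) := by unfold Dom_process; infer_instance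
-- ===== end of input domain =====

-- B removes A's position counter and parity test: it filters the qualifying even tokens once, then
-- consumes them two at a time (spelling the first of each pair, keeping the second) and space-joins,
-- with the word table as a list indexed by character code (objective: alternative).


-- ===== PORT A =====
-- the module-level dict `words` used by A
def pvWords : PySem.Dict String String :=
  ⟨[("0", "ноль"), ("1", "один"), ("2", "два"), ("3", "три"), ("4", "четыре"),
    ("5", "пять"), ("6", "шесть"), ("7", "семь"), ("8", "восемь"), ("9", "девять")]⟩

-- words[digit] is ported as getD with default "": the digits of str(number) for the nonnegative
-- numbers process passes in are always keys of the dict, so the default is never reached.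
def number_words (number : Int) : String :=
  let result := (PySem.Int.toChars number).foldl
    (fun r d => r ++ pvWords.getD (String.ofList [d]) "" ++ " ") ""
  PySem.Str.strip result

def process (input_posled : String) : String :=
  let numbers := PySem.Str.split₀ input_posled
  let st := numbers.foldl (fun (st : String × Int) item =>
    if PySem.Str.strIsdigit item && decide (PySem.Str.len item ≤ 5) then
      -- int(item): never raises after item.isdigit(), ported with getD 0
      let number := (PySem.Int.ofStr? item).getD 0
      if PySem.Int.mod number 2 = 0 then
        if PySem.Int.mod st.2 2 ≠ 0 then
          (st.1 ++ number_words number ++ " ", st.2 + 1)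
        else
          (st.1 ++ item ++ " ", st.2 + 1)
      else st
    else st) ("", 1)
  PySem.Str.strip st.1

-- ===== PORT B =====
-- the module-level list `WORDS` used by B
def pvWORDS : List String :=
  ["ноль", "один", "два", "три", "четыре", "пять", "шесть", "семь", "восемь", "девять"]

-- WORDS[ord(d) - 48] ported as pyGet? (Python list indexing) with getD "": the digits of
-- str(number) always index in range, so the default is never reached.
def number_words_alt (number : Int) : String :=
  PySem.Str.join " "
    ((PySem.Int.toChars number).map
      (fun d => (PySem.List.pyGet? pvWORDS ((d.toNat : Int) - 48)).getD ""))

def pvQualifies (t : String) : Bool :=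
  PySem.Str.strIsdigit t && decide (PySem.Str.len t ≤ 5) &&
    decide (PySem.Int.mod ((PySem.Int.ofStr? t).getD 0) 2 = 0)

-- the for-loop over `it = iter(qualifying)`: one iteration consumes the pair (first, second);
-- `next(it, None)` returning None (the break) is the one-element case
def renderPairs : List String → List String
  | [] => []
  | [first] => [number_words_alt ((PySem.Int.ofStr? first).getD 0)]
  | first :: second :: rest =>
      number_words_alt ((PySem.Int.ofStr? first).getD 0) :: second :: renderPairs rest

def process_alt (input_posled : String) : String :=
  let qualifying := (PySem.Str.split₀ input_posled).filter pvQualifies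
  PySem.Str.join " " (renderPairs qualifying)

-- ===== PRECONDITION & SPEC =====
def Spec_process (input_posled : String) (out : String) : Prop := out = process_alt input_posled
instance (input_posled : String) (out : String) : Decidable (Spec_process input_posled out) := by unfold Spec_process; infer_instance

-- ===== CLAIM (what is proved, stated in full; the proofs are below) =====
def Claim_equal_process : Prop := ∀ (input_posled : String), Dom_process input_posled → Spec_process input_posled (process input_posled)

-- ===== LEMMAS AND PROOFS =====

-- a char list does not start or end with whitespace (and is nonempty)
def pvOk (p : List Char) : Prop :=
  p ≠ [] ∧ (∀ c, p.head? = some c → PySem.Chars.isspace c = false) ∧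
    (∀ c, p.getLast? = some c → PySem.Chars.isspace c = false)

def pvWord (c : Char) : String := pvWords.getD (String.ofList [c]) ""
def pvWordB (c : Char) : String := (PySem.List.pyGet? pvWORDS ((c.toNat : Int) - 48)).getD ""

-- a digit char is one of the ten digits
lemma pv_digit_cases (c : Char) (h : PySem.Chars.isdigit c = true) :
    c ∈ ['0', '1', '2', '3', '4', '5', '6', '7', '8', '9'] := by
  simp only [PySem.Chars.isdigit, Bool.and_eq_true, decide_eq_true_eq] at h
  obtain ⟨h1, h2⟩ := h
  have hv1 : 48 ≤ c.toNat := h1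
  have hv2 : c.toNat ≤ 57 := h2
  have hc : Char.ofNat c.toNat = c := Char.ofNat_toNat c
  rw [← hc]
  interval_cases h : c.toNat <;> decide

-- on the ten digits the two tables agree
lemma pv_wordB_eq_word (c : Char) (h : PySem.Chars.isdigit c = true) :
    pvWordB c = pvWord c := by
  have := pv_digit_cases c h
  fin_cases this <;> decide

lemma pvOk_intro (p : List Char)
    (h : (p.head?.all (fun c => !PySem.Chars.isspace c) &&
          p.getLast?.all (fun c => !PySem.Chars.isspace c) && !p.isEmpty) = true) : pvOk p := by
  simp only [Bool.and_eq_true, Option.all_eq_true, Bool.not_eq_true'] at h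
  obtain ⟨⟨h1, h2⟩, h3⟩ := h
  refine ⟨by simpa using h3, fun c hc => h1 c hc, fun c hc => h2 c hc⟩

lemma pv_digit_word_ok (c : Char) (h : PySem.Chars.isdigit c = true) :
    pvOk (pvWord c).toList := by
  have := pv_digit_cases c h
  fin_cases this <;> exact pvOk_intro _ (by decide)

lemma pv_digit_not_space (c : Char) (h : PySem.Chars.isdigit c = true) :
    PySem.Chars.isspace c = false := by
  have := pv_digit_cases c h
  fin_cases this <;> decide

lemma pv_digit_not_intspace (c : Char) (h : PySem.Chars.isdigit c = true) :
    PySem.Int.isIntSpace c = false := by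
  have := pv_digit_cases c h
  fin_cases this <;> decide

lemma pv_isdigit_eq (c : Char) : PySem.Chars.isdigit c = c.isDigit := by
  simp [PySem.Chars.isdigit, Char.isDigit, Char.le_def]
  rfl

-- str(n) of a nonnegative n is a nonempty digit string
lemma pv_toChars_digits (n : Int) (hn : 0 ≤ n) :
    PySem.Int.toChars n ≠ [] ∧ ∀ c ∈ PySem.Int.toChars n, PySem.Chars.isdigit c = true := by
  unfold PySem.Int.toChars
  rw [if_neg (by omega)]
  refine ⟨?_, fun c hc => ?_⟩
  · exact List.ne_nil_of_length_pos Nat.length_toDigits_pos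
  · rw [pv_isdigit_eq]
    exact Nat.isDigit_of_mem_toDigits (by norm_num) (by norm_num) hc

-- int(t) of a digit string is nonnegative (also when ofStr? would fail, getD 0)
lemma pv_bind_nonneg (o : Option Nat) : 0 ≤ ((o.bind fun a => some ((a : Int))).getD 0) := by
  cases o <;> simp

lemma pv_ofStr_nonneg (t : String) (h : PySem.Str.strIsdigit t = true) :
    0 ≤ (PySem.Int.ofStr? t).getD 0 := by
  rw [PySem.Int.ofStr?]
  simp only [PySem.Str.strIsdigit_eq, PySem.Chars.strIsdigit, Bool.and_eq_true,
    Bool.not_eq_true', List.isEmpty_eq_false_iff, List.all_eq_true] at h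
  obtain ⟨hne, hall⟩ := h
  generalize hl : t.toList = l at *
  unfold PySem.Int.ofChars?
  have hd1 : List.dropWhile PySem.Int.isIntSpace l = l := by
    apply List.dropWhile_eq_self_iff.mpr
    intro hl0
    simp [pv_digit_not_intspace _ (hall _ (List.getElem_mem hl0))]
  rw [hd1]
  have hd2 : List.dropWhile PySem.Int.isIntSpace l.reverse = l.reverse := by
    apply List.dropWhile_eq_self_iff.mpr
    intro hl0
    have hm : l[l.length - 1]'(by simp at hl0 ⊢; omega) ∈ l := List.getElem_mem _
    simp [pv_digit_not_intspace _ (hall _ hm)]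
  rw [hd2, List.reverse_reverse]
  obtain ⟨c, rest, rfl⟩ := List.exists_cons_of_ne_nil hne
  have hdc := pv_digit_cases c (hall c (by simp))
  fin_cases hdc <;> simp <;> exact pv_bind_nonneg _

-- rstrip eats exactly the final separator when the last part ends in non-whitespace
lemma pv_rstrip_append_space (p : List Char) (hp : pvOk p) :
    PySem.Chars.rstrip (p ++ [' ']) = p := by
  obtain ⟨hne, -, hlast⟩ := hp
  unfold PySem.Chars.rstrip
  rw [List.reverse_append]
  simp only [List.reverse_singleton, List.singleton_append, List.dropWhile_cons]
  rw [if_pos (by decide)]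
  have hh : ∀ c, p.reverse.head? = some c → PySem.Chars.isspace c = false := by
    intro c hc; exact hlast c (by rwa [List.head?_reverse] at hc)
  obtain ⟨d, pr, hpr⟩ := List.exists_cons_of_ne_nil (by simpa using hne : p.reverse ≠ [])
  rw [hpr, List.dropWhile_cons, if_neg (by simp [hh d (by rw [hpr]; rfl)]), ← hpr,
    List.reverse_reverse]

lemma pv_lstrip_of_head (l : List Char) (h : ∀ c, l.head? = some c → PySem.Chars.isspace c = false) :
    PySem.Chars.lstrip l = l := by
  unfold PySem.Chars.lstrip
  cases l with
  | nil => rfl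
  | cons a l => rw [List.dropWhile_cons, if_neg (by simp [h a rfl])]

lemma pv_join_ne_nil (ps : List (List Char)) (hne : ps ≠ []) (h : ∀ p ∈ ps, pvOk p) :
    PySem.Chars.join [' '] ps ≠ [] := by
  match ps with
  | [p] => rw [PySem.Chars.join_singleton]; exact (h p (by simp)).1
  | p :: q :: rest =>
      rw [PySem.Chars.join_cons_cons]
      have hpne := (h p (by simp)).1
      intro hc
      rw [List.append_assoc] at hc
      exact hpne (List.append_eq_nil_iff.mp hc).1

lemma pv_join_head? (ps : List (List Char)) (h : ∀ p ∈ ps, pvOk p) :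
    ∀ c, (PySem.Chars.join [' '] ps).head? = some c → PySem.Chars.isspace c = false := by
  match ps with
  | [] => simp [PySem.Chars.join_nil]
  | [p] => rw [PySem.Chars.join_singleton]; exact (h p (by simp)).2.1
  | p :: q :: rest =>
      rw [PySem.Chars.join_cons_cons]
      intro c hc
      obtain ⟨hne, hh, -⟩ := h p (by simp)
      rw [List.append_assoc, List.head?_append] at hc
      obtain ⟨a, pr, rfl⟩ := List.exists_cons_of_ne_nil hne
      simp at hc
      exact hh c (by rw [← hc]; rfl)

lemma pv_join_getLast? (ps : List (List Char)) (h : ∀ p ∈ ps, pvOk p) :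
    ∀ c, (PySem.Chars.join [' '] ps).getLast? = some c → PySem.Chars.isspace c = false := by
  match ps with
  | [] => simp [PySem.Chars.join_nil]
  | [p] => rw [PySem.Chars.join_singleton]; exact (h p (by simp)).2.2
  | p :: q :: rest =>
      rw [PySem.Chars.join_cons_cons]
      intro c hc
      have ih := pv_join_getLast? (q :: rest) (fun x hx => h x (by simp [hx]))
      rw [List.getLast?_append] at hc
      rw [Option.or_eq_some_iff] at hc
      rcases hc with hc | ⟨hc, -⟩
      · exact ih c hc
      · exact absurd hc
          (by simp [pv_join_ne_nil (q :: rest) (by simp) (fun x hx => h x (by simp [hx]))])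

-- key lemma: stripping the space-terminated concatenation is the space-join
lemma pv_strip_flatten (ps : List (List Char)) (h : ∀ p ∈ ps, pvOk p) :
    PySem.Chars.strip ((ps.map (· ++ [' '])).flatten) = PySem.Chars.join [' '] ps := by
  match ps with
  | [] => simp [PySem.Chars.join_nil]; rfl
  | p :: rest =>
      unfold PySem.Chars.strip
      have hok := h p (by simp)
      rw [List.map_cons, List.flatten_cons]
      rw [pv_lstrip_of_head _ ?hd]
      case hd =>
        intro c hc
        rw [List.append_assoc, List.head?_append] at hc
        obtain ⟨a, pr, rfl⟩ := List.exists_cons_of_ne_nil hok.1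
        simp at hc
        exact hok.2.1 c (by rw [← hc]; rfl)
      match rest with
      | [] => simpa [PySem.Chars.join_singleton] using pv_rstrip_append_space p hok
      | q :: rest' =>
          have ih : PySem.Chars.rstrip (((q :: rest').map (· ++ [' '])).flatten)
              = PySem.Chars.join [' '] (q :: rest') := by
            have := pv_strip_flatten (q :: rest') (fun x hx => h x (by simp [hx]))
            unfold PySem.Chars.strip at this
            rwa [pv_lstrip_of_head _ ?_] at this
            · intro c hc
              have hq := h q (by simp)
              rw [List.map_cons, List.flatten_cons, List.append_assoc, List.head?_append] at hc
              obtain ⟨a, pr, rfl⟩ := List.exists_cons_of_ne_nil hq.1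
              simp at hc
              exact hq.2.1 c (by rw [← hc]; rfl)
          have hrne : PySem.Chars.rstrip (((q :: rest').map (· ++ [' '])).flatten) ≠ [] := by
            rw [ih]
            exact pv_join_ne_nil _ (by simp) (fun x hx => h x (by simp [hx]))
          unfold PySem.Chars.rstrip at ih hrne ⊢
          rw [List.reverse_append, List.dropWhile_append,
            if_neg (by simpa using hrne), List.reverse_append, List.reverse_reverse, ih,
            PySem.Chars.join_cons_cons, List.append_assoc]

lemma pv_join_ok (ps : List (List Char)) (hne : ps ≠ []) (h : ∀ p ∈ ps, pvOk p) :
    pvOk (PySem.Chars.join [' '] ps) :=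
  ⟨pv_join_ne_nil ps hne h, pv_join_head? ps h, pv_join_getLast? ps h⟩

-- A's number_words equals B's
lemma pv_nw_fold (cs : List Char) : ∀ (r : String),
    (cs.foldl (fun r d => r ++ pvWords.getD (String.ofList [d]) "" ++ " ") r).toList
      = r.toList ++ ((cs.map (fun d => (pvWord d).toList)).map (· ++ [' '])).flatten := by
  induction cs with
  | nil => simp
  | cons a cs ih =>
      intro r
      simp only [List.foldl_cons, ih, List.map_cons, List.flatten_cons]
      simp [pvWord, String.toList_append]

lemma pv_number_words_eq (n : Int) (hn : 0 ≤ n) : number_words n = number_words_alt n := by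
  apply String.toList_inj.mp
  obtain ⟨hne, hdig⟩ := pv_toChars_digits n hn
  rw [number_words, number_words_alt, PySem.Str.toList_strip, PySem.Str.toList_join, pv_nw_fold]
  have hok : ∀ p ∈ (PySem.Int.toChars n).map (fun d => (pvWord d).toList), pvOk p := by
    intro p hp
    obtain ⟨d, hd, rfl⟩ := List.mem_map.mp hp
    exact pv_digit_word_ok d (hdig d hd)
  have hsf := pv_strip_flatten _ hok
  simp only [String.toList_empty, List.nil_append] at *
  rw [hsf]
  congr 1
  rw [List.map_map]
  apply List.map_congr_left
  intro d hd
  show (pvWord d).toList = (pvWordB d).toList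
  rw [pv_wordB_eq_word d (hdig d hd)]

lemma pv_number_words_alt_ok (n : Int) (hn : 0 ≤ n) : pvOk (number_words_alt n).toList := by
  obtain ⟨hne, hdig⟩ := pv_toChars_digits n hn
  rw [number_words_alt, PySem.Str.toList_join]
  have : (" " : String).toList = [' '] := rfl
  rw [this]
  apply pv_join_ok
  · simp [hne]
  · intro p hp
    rw [List.map_map] at hp
    obtain ⟨d, hd, rfl⟩ := List.mem_map.mp hp
    show pvOk (pvWordB d).toList
    rw [pv_wordB_eq_word d (hdig d hd)]
    exact pv_digit_word_ok d (hdig d hd)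

lemma pv_token_ok (t : String) (h : PySem.Str.strIsdigit t = true) : pvOk t.toList := by
  simp only [PySem.Str.strIsdigit_eq, PySem.Chars.strIsdigit, Bool.and_eq_true,
    Bool.not_eq_true', List.isEmpty_eq_false_iff, List.all_eq_true] at h
  obtain ⟨hne, hall⟩ := h
  refine ⟨hne, fun c hc => ?_, fun c hc => ?_⟩
  · exact pv_digit_not_space c (hall c (List.mem_of_mem_head? hc))
  · exact pv_digit_not_space c (hall c (List.mem_of_getLast? hc))

-- the parts A's loop appends, starting at position pos
def pvParts : Int → List String → List String
  | _, [] => []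
  | pos, t :: ts =>
      (if PySem.Int.mod pos 2 ≠ 0 then number_words ((PySem.Int.ofStr? t).getD 0) else t) ::
        pvParts (pos + 1) ts

-- the space-terminated concatenation A accumulates
def pvCat : List String → String
  | [] => ""
  | p :: ps => p ++ " " ++ pvCat ps

lemma pv_toList_pvCat (ps : List String) :
    (pvCat ps).toList = ((ps.map String.toList).map (· ++ [' '])).flatten := by
  induction ps with
  | nil => rfl
  | cons p ps ih => simp [pvCat, String.toList_append, ih]

-- A's loop over the qualifying tokens
lemma pv_foldA (q : List String) : ∀ (res : String) (pos : Int),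
    q.foldl (fun (st : String × Int) item =>
      (fun st (item : String) =>
        let number := (PySem.Int.ofStr? item).getD 0
        if PySem.Int.mod st.2 2 ≠ 0 then
          (st.1 ++ number_words number ++ " ", st.2 + 1)
        else
          (st.1 ++ item ++ " ", st.2 + 1)) st item) (res, pos)
      = (res ++ pvCat (pvParts pos q), pos + q.length) := by
  induction q with
  | nil => intro res pos; simp [pvParts, pvCat]
  | cons t ts ih =>
      intro res pos
      rw [List.foldl_cons]
      show List.foldl _
          (if PySem.Int.mod pos 2 ≠ 0 then
            (res ++ number_words ((PySem.Int.ofStr? t).getD 0) ++ " ", pos + 1)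
          else (res ++ t ++ " ", pos + 1)) ts = _
      by_cases hpar : PySem.Int.mod pos 2 ≠ 0
      · rw [if_pos hpar, ih, pvParts, if_pos hpar, pvCat]
        refine Prod.ext ?_ (by simp; omega)
        simp [String.append_assoc]
      · rw [if_neg hpar, ih, pvParts, if_neg hpar, pvCat]
        refine Prod.ext ?_ (by simp; omega)
        simp [String.append_assoc]

-- B's pairwise rendering produces A's parts at any odd position
lemma pv_pairs_parts (q : List String) : ∀ (pos : Int), PySem.Int.mod pos 2 ≠ 0 →
    (∀ t ∈ q, pvQualifies t = true) → renderPairs q = pvParts pos q := by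
  induction q using renderPairs.induct with
  | case1 => intro pos _ _; simp [renderPairs, pvParts]
  | case2 t =>
      intro pos hpar hq
      have hsd : PySem.Str.strIsdigit t = true := by
        have := hq t (by simp)
        simp only [pvQualifies, Bool.and_eq_true] at this
        exact this.1.1
      rw [renderPairs, pvParts, pvParts, if_pos hpar,
        pv_number_words_eq _ (pv_ofStr_nonneg t hsd)]
  | case3 t u rest ih =>
      intro pos hpar hq
      have hsd : PySem.Str.strIsdigit t = true := by
        have := hq t (by simp)
        simp only [pvQualifies, Bool.and_eq_true] at this
        exact this.1.1
      have h2 : ¬ PySem.Int.mod (pos + 1) 2 ≠ 0 := by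
        simp only [PySem.Int.mod_eq_emod_of_pos (by omega : (0:Int) < 2)] at hpar ⊢
        omega
      have h3 : PySem.Int.mod (pos + 1 + 1) 2 ≠ 0 := by
        simp only [PySem.Int.mod_eq_emod_of_pos (by omega : (0:Int) < 2)] at hpar ⊢
        omega
      rw [renderPairs, pvParts, if_pos hpar, pvParts, if_neg h2,
        pv_number_words_eq _ (pv_ofStr_nonneg t hsd),
        ih (pos + 1 + 1) h3 (fun x hx => hq x (by simp [hx]))]

lemma pv_parts_ok (q : List String) : ∀ (pos : Int),
    (∀ t ∈ q, pvQualifies t = true) → ∀ p ∈ pvParts pos q, pvOk p.toList := by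
  induction q with
  | nil => intro pos _ p hp; simp [pvParts] at hp
  | cons t ts ih =>
      intro pos hq p hp
      have hqt := hq t (by simp)
      have hsd : PySem.Str.strIsdigit t = true := by
        simp only [pvQualifies, Bool.and_eq_true] at hqt
        exact hqt.1.1
      rw [pvParts] at hp
      rcases List.mem_cons.mp hp with rfl | hp
      · by_cases hpar : PySem.Int.mod pos 2 ≠ 0
        · rw [if_pos hpar, pv_number_words_eq _ (pv_ofStr_nonneg t hsd)]
          exact pv_number_words_alt_ok _ (pv_ofStr_nonneg t hsd)
        · rw [if_neg hpar]
          exact pv_token_ok t hsd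
      · exact ih (pos + 1) (fun x hx => hq x (by simp [hx])) p hp

lemma pv_main (s : String) : process s = process_alt s := by
  rw [process, process_alt]
  have hstep : (fun (st : String × Int) (item : String) =>
      if PySem.Str.strIsdigit item && decide (PySem.Str.len item ≤ 5) then
        let number := (PySem.Int.ofStr? item).getD 0
        if PySem.Int.mod number 2 = 0 then
          if PySem.Int.mod st.2 2 ≠ 0 then
            (st.1 ++ number_words number ++ " ", st.2 + 1)
          else
            (st.1 ++ item ++ " ", st.2 + 1)
        else st
      else st)
      = fun (st : String × Int) (item : String) =>
        if pvQualifies item = true then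
          (fun (st : String × Int) (item : String) =>
            let number := (PySem.Int.ofStr? item).getD 0
            if PySem.Int.mod st.2 2 ≠ 0 then
              (st.1 ++ number_words number ++ " ", st.2 + 1)
            else
              (st.1 ++ item ++ " ", st.2 + 1)) st item
        else st := by
    funext st item
    by_cases h1 : (PySem.Str.strIsdigit item && decide (PySem.Str.len item ≤ 5)) = true <;>
      by_cases h2 : PySem.Int.mod ((PySem.Int.ofStr? item).getD 0) 2 = 0 <;>
      simp [pvQualifies] <;> split_ifs <;> first | rfl | tauto
  rw [hstep, PySem.List.foldl_if_eq_foldl_filter, pv_foldA]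
  apply String.toList_inj.mp
  set q := (PySem.Str.split₀ s).filter pvQualifies with hq
  have hmem : ∀ t ∈ q, pvQualifies t = true := fun t ht => List.of_mem_filter ht
  have hpp := pv_pairs_parts q 1 (by decide) hmem
  rw [hpp, PySem.Str.toList_strip, PySem.Str.toList_join]
  have hemp : (("" : String) ++ pvCat (pvParts 1 q)).toList = (pvCat (pvParts 1 q)).toList := by
    simp
  rw [hemp, pv_toList_pvCat, pv_strip_flatten _ ?_]
  · rfl
  · intro p hp
    obtain ⟨x, hx, rfl⟩ := List.mem_map.mp hp
    exact pv_parts_ok q 1 hmem x hx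

-- ===== VERDICT (by name: the statement is the Claim_ definition above) =====
theorem process_spec : Claim_equal_process := by
  intro s _
  unfold Spec_process
  exact pv_main s
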